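-- pv_equiv track=rewrite | github.com/MiiRaGe/aoc | 10.py | get_topography_score_and_ratings
-- ===== SOURCE A (Python) =====
-- DIRECTIONS = [(-1,0), (1, 0), (0, 1), (0, -1)]
--
-- def get_topography_score_and_ratings(matrix):
--     score = [[{(x,y)} if el == 9 else set() for y, el in enumerate(line)] for x,line in enumerate(matrix)]
--     ratings = [[1 if el == 9 else 0 for y, el in enumerate(line)] for x,line in enumerate(matrix)]
--     for i in range(8,-1,-1):
--         for x, line in enumerate(matrix):
--             for y, el in enumerate(line):
--                 if el == i:
--                     score[x][y] = sum_accessible_trail(matrix, score, i, x, y)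
--                     ratings[x][y] = sum_accessible_ratings(matrix, ratings, i, x, y)
--     return score, ratings
--
-- def sum_accessible_trail(matrix, score, i, x, y):
--     accessible_peak = set()
--     for (dx, dy) in DIRECTIONS:
--         new_x, new_y = x+dx,y+dy
--         if verify_coordinate(matrix, new_x, new_y) and matrix[new_x][new_y] == i+1:
--             accessible_peak = accessible_peak.union(score[new_x][new_y])
--     return accessible_peak
--
-- def sum_accessible_ratings(matrix, ratings, i, x, y):
--     accessible_ratings = 0
--     for (dx, dy) in DIRECTIONS:
--         new_x, new_y = x+dx,y+dy
--         if verify_coordinate(matrix, new_x, new_y) and matrix[new_x][new_y] == i+1: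
--             accessible_ratings += ratings[new_x][new_y]
--     return accessible_ratings
--
-- def verify_coordinate(matrix, x, y):
--     max_x = len(matrix)
--     max_y = len(matrix[0])
--     return 0 <= x < max_x and 0 <= y < max_y
-- ===== SOURCE B (Python) =====
-- def get_topography_score_and_ratings(matrix):
--     H = len(matrix)
--     W = len(matrix[0]) if matrix else 0
--
--     def reach(x, y):
--         # (set of reachable 9-cells, number of strictly increasing paths to a 9)
--         v = matrix[x][y]
--         if v == 9:
--             return {(x, y)}, 1
--         if not (0 <= v < 9):
--             return set(), 0
--         peaks, count = set(), 0
--         for nx, ny in ((x - 1, y), (x + 1, y), (x, y + 1), (x, y - 1)):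
--             if 0 <= nx < H and 0 <= ny < W and matrix[nx][ny] == v + 1:
--                 p, c = reach(nx, ny)
--                 peaks, count = peaks | p, count + c
--         return peaks, count
--
--     results = [[reach(x, y) for y in range(len(line))] for x, line in enumerate(matrix)]
--     return [[p for p, _ in row] for row in results], [[c for _, c in row] for row in results]
-- ===== Notes on version B (the rewrite author's own statement) =====
-- stated objective: alternative
-- what changed: Replaces A's nine bottom-up full-grid sweeps over two pre-filled mutable matrices with a single pass that calls a top-down recursive DFS reach(x,y) over the height-increasing DAG, returning the (peak-set, path-count) pair per cell and splitting it into the two grids.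
import Mathlib
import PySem

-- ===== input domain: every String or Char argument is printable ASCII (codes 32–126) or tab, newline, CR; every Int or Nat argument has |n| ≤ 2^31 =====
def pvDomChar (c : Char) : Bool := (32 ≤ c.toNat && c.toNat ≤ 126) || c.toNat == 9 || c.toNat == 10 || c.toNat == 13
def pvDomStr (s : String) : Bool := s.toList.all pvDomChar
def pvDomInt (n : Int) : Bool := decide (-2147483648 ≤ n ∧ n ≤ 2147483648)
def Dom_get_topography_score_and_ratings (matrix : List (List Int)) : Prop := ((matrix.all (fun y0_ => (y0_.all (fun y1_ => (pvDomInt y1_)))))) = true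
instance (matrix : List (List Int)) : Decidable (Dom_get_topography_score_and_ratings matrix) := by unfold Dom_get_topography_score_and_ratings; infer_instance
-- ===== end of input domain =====

-- B replaces A's nine bottom-up full-grid sweeps by a top-down recursive DFS over the
-- height-increasing DAG (objective: alternative decomposition, not speed).

-- ===== PORT A =====
def pvDIRECTIONS : List (Int × Int) := [(-1, 0), (1, 0), (0, 1), (0, -1)]

-- len(matrix[0]) is only evaluated by Python when matrix is nonempty; headD [] is exact there.
def verify_coordinate (matrix : List (List Int)) (x y : Int) : Bool :=
  decide (0 ≤ x ∧ x < (matrix.length : Int) ∧ 0 ≤ y ∧ y < ((matrix.headD []).length : Int))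

-- matrix[new_x][new_y]: indices are nonnegative (verify passed); the row read is in range under Pre_.
def sum_accessible_trail (matrix : List (List Int)) (score : List (List (List (Int × Int)))) (i x y : Int) : List (Int × Int) :=
  pvDIRECTIONS.foldl (fun acc d =>
    if verify_coordinate matrix (x + d.1) (y + d.2) &&
       (PySem.List.pyGetD (PySem.List.pyGetD matrix (x + d.1) []) (y + d.2) 0 == i + 1) then
      PySem.Set.union acc (PySem.List.pyGetD (PySem.List.pyGetD score (x + d.1) []) (y + d.2) [])
    else acc) []

def sum_accessible_ratings (matrix : List (List Int)) (ratings : List (List Int)) (i x y : Int) : Int :=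
  pvDIRECTIONS.foldl (fun acc d =>
    if verify_coordinate matrix (x + d.1) (y + d.2) &&
       (PySem.List.pyGetD (PySem.List.pyGetD matrix (x + d.1) []) (y + d.2) 0 == i + 1) then
      acc + PySem.List.pyGetD (PySem.List.pyGetD ratings (x + d.1) []) (y + d.2) 0
    else acc) 0

def get_topography_score_and_ratings (matrix : List (List Int)) : (List (List (List (Int × Int)))) × List (List Int) :=
  let score := (PySem.List.enumerate matrix 0).map (fun xl =>
    (PySem.List.enumerate xl.2 0).map (fun yel =>
      if yel.2 == 9 then PySem.Set.ofList [(xl.1, yel.1)] else PySem.Set.empty))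
  let ratings := (PySem.List.enumerate matrix 0).map (fun xl =>
    (PySem.List.enumerate xl.2 0).map (fun yel => if yel.2 == 9 then (1 : Int) else 0))
  (PySem.List.pyRange 8 (-1) (-1)).foldl (fun st i =>
    (PySem.List.enumerate matrix 0).foldl (fun st xl =>
      (PySem.List.enumerate xl.2 0).foldl (fun st yel =>
        if yel.2 == i then
          (PySem.List.pySetD st.1 xl.1
             (PySem.List.pySetD (PySem.List.pyGetD st.1 xl.1 []) yel.1
                (sum_accessible_trail matrix st.1 i xl.1 yel.1)),
           PySem.List.pySetD st.2 xl.1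
             (PySem.List.pySetD (PySem.List.pyGetD st.2 xl.1 []) yel.1
                (sum_accessible_ratings matrix st.2 i xl.1 yel.1)))
        else st) st) st) (score, ratings)

-- ===== PORT B =====
-- v = matrix[x][y] (read only at in-range coordinates under Pre_)
def pvCell (matrix : List (List Int)) (x y : Int) : Int :=
  PySem.List.pyGetD (PySem.List.pyGetD matrix x []) y 0

-- 0 <= x < H and 0 <= y < W, with H = len(matrix), W = len(matrix[0]) if matrix else 0
def pvInBounds (matrix : List (List Int)) (x y : Int) : Bool :=
  decide (0 ≤ x ∧ x < (matrix.length : Int) ∧ 0 ≤ y ∧ y < ((matrix.headD []).length : Int))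

-- reach(x, y): the 4-tuple loop of Source B, unrolled iteration by iteration (same order, same steps).
def reach (matrix : List (List Int)) (x y : Int) : List (Int × Int) × Int :=
  if pvCell matrix x y = 9 then ([(x, y)], 1)
  else if hv : 0 ≤ pvCell matrix x y ∧ pvCell matrix x y < 9 then
    let a0 : List (Int × Int) × Int := ([], 0)
    let a1 := if h : pvInBounds matrix (x - 1) y = true ∧ pvCell matrix (x - 1) y = pvCell matrix x y + 1 then
        let r := reach matrix (x - 1) y; (PySem.Set.union a0.1 r.1, a0.2 + r.2) else a0
    let a2 := if h : pvInBounds matrix (x + 1) y = true ∧ pvCell matrix (x + 1) y = pvCell matrix x y + 1 then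
        let r := reach matrix (x + 1) y; (PySem.Set.union a1.1 r.1, a1.2 + r.2) else a1
    let a3 := if h : pvInBounds matrix x (y + 1) = true ∧ pvCell matrix x (y + 1) = pvCell matrix x y + 1 then
        let r := reach matrix x (y + 1); (PySem.Set.union a2.1 r.1, a2.2 + r.2) else a2
    let a4 := if h : pvInBounds matrix x (y - 1) = true ∧ pvCell matrix x (y - 1) = pvCell matrix x y + 1 then
        let r := reach matrix x (y - 1); (PySem.Set.union a3.1 r.1, a3.2 + r.2) else a3
    a4
  else ([], 0)
termination_by (9 - pvCell matrix x y).toNat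
decreasing_by
  all_goals (obtain ⟨-, hc⟩ := h; rw [hc]; omega)

def get_topography_score_and_ratings_alt (matrix : List (List Int)) : (List (List (List (Int × Int)))) × List (List Int) :=
  let results := (PySem.List.enumerate matrix 0).map (fun xl =>
    (PySem.List.pyRange 0 (xl.2.length : Int) 1).map (fun y => reach matrix xl.1 y))
  (results.map (fun row => row.map (fun r => r.1)),
   results.map (fun row => row.map (fun r => r.2)))

-- ===== PRECONDITION & SPEC =====
-- Pre_ excludes exactly the (ragged) matrices on which A raises IndexError: those where some cell
-- with height 0..8 has a neighbour inside the H x len(matrix[0]) bounding box whose own row is too short.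
def Pre_get_topography_score_and_ratings (matrix : List (List Int)) : Prop :=
  ∀ x ∈ List.range matrix.length, ∀ y ∈ List.range (matrix.getD x []).length,
    ∀ d ∈ ([(-1, 0), (1, 0), (0, 1), (0, -1)] : List (Int × Int)),
      (0 ≤ (matrix.getD x []).getD y 0 ∧ (matrix.getD x []).getD y 0 ≤ 8 ∧
       0 ≤ (x : Int) + d.1 ∧ (x : Int) + d.1 < (matrix.length : Int) ∧
       0 ≤ (y : Int) + d.2 ∧ (y : Int) + d.2 < ((matrix.headD []).length : Int)) →
      ((y : Int) + d.2).toNat < (matrix.getD ((x : Int) + d.1).toNat []).length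

instance (matrix : List (List Int)) : Decidable (Pre_get_topography_score_and_ratings matrix) := by
  unfold Pre_get_topography_score_and_ratings; infer_instance

def pvWitness_get_topography_score_and_ratings : List (List Int) := [[8, 9]]

def Spec_get_topography_score_and_ratings (matrix : List (List Int)) (out : (List (List (List (Int × Int)))) × List (List Int)) : Prop := out = get_topography_score_and_ratings_alt matrix
instance (matrix : List (List Int)) (out : (List (List (List (Int × Int)))) × List (List Int)) : Decidable (Spec_get_topography_score_and_ratings matrix out) := by unfold Spec_get_topography_score_and_ratings; infer_instance

-- ===== CLAIM (what is proved, stated in full; the proofs are below) =====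
def Claim_equal_get_topography_score_and_ratings : Prop := ∀ (matrix : List (List Int)), Dom_get_topography_score_and_ratings matrix → Pre_get_topography_score_and_ratings matrix → Spec_get_topography_score_and_ratings matrix (get_topography_score_and_ratings matrix)

-- ===== LEMMAS AND PROOFS =====

-- abbreviations used only by the proofs
def pvVal (m : List (List Int)) (x y : Nat) : Int := (m.getD x []).getD y 0

def pvShape {α : Type} (m : List (List Int)) (g : List (List α)) : Prop :=
  g.length = m.length ∧ ∀ x : Nat, (g.getD x []).length = (m.getD x []).length

def pvEntry {α : Type} (g : List (List α)) (d : α) (x y : Nat) : α := (g.getD x []).getD y d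

-- the two initial grids of port A
def pvInitS (m : List (List Int)) : List (List (List (Int × Int))) :=
  (PySem.List.enumerate m 0).map (fun xl =>
    (PySem.List.enumerate xl.2 0).map (fun yel =>
      if yel.2 == 9 then PySem.Set.ofList [(xl.1, yel.1)] else PySem.Set.empty))

def pvInitR (m : List (List Int)) : List (List Int) :=
  (PySem.List.enumerate m 0).map (fun xl =>
    (PySem.List.enumerate xl.2 0).map (fun yel => if yel.2 == 9 then (1 : Int) else 0))

-- the loop bodies of port A, named so the proofs can speak about them (definitionally the port's lambdas)
def pvCellStep (m : List (List Int)) (i X : Int)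
    (st : (List (List (List (Int × Int)))) × List (List Int)) (yel : Int × Int) :
    (List (List (List (Int × Int)))) × List (List Int) :=
  if yel.2 == i then
    (PySem.List.pySetD st.1 X
       (PySem.List.pySetD (PySem.List.pyGetD st.1 X []) yel.1
          (sum_accessible_trail m st.1 i X yel.1)),
     PySem.List.pySetD st.2 X
       (PySem.List.pySetD (PySem.List.pyGetD st.2 X []) yel.1
          (sum_accessible_ratings m st.2 i X yel.1)))
  else st

def pvRowStep (m : List (List Int)) (i : Int)
    (st : (List (List (List (Int × Int)))) × List (List Int)) (xl : Int × List Int) :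
    (List (List (List (Int × Int)))) × List (List Int) :=
  (PySem.List.enumerate xl.2 0).foldl (pvCellStep m i xl.1) st

-- condition describing which cells already hold their final value: D = cells of height i already swept
def pvCond (m : List (List Int)) (i : Int) (D : Nat → Nat → Bool) (x y : Nat) : Bool :=
  (decide (pvVal m x y = i) && D x y) || decide (i < pvVal m x y ∧ pvVal m x y ≤ 9)

def pvDesc (m : List (List Int)) (C : Nat → Nat → Bool)
    (st : (List (List (List (Int × Int)))) × List (List Int)) : Prop :=
  pvShape m st.1 ∧ pvShape m st.2 ∧
  ∀ x y : Nat, x < m.length → y < (m.getD x []).length →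
    pvEntry st.1 [] x y = (if C x y then (reach m ↑x ↑y).1 else []) ∧
    pvEntry st.2 0 x y = (if C x y then (reach m ↑x ↑y).2 else 0)

lemma pvDesc_congr {m : List (List Int)} {C C' : Nat → Nat → Bool}
    {st : (List (List (List (Int × Int)))) × List (List Int)}
    (h : ∀ x y : Nat, x < m.length → y < (m.getD x []).length → C x y = C' x y) :
    pvDesc m C st → pvDesc m C' st := by
  rintro ⟨h1, h2, h3⟩
  exact ⟨h1, h2, fun x y hx hy => by rw [← h x y hx hy]; exact h3 x y hx hy⟩

lemma pvCell_natCast (m : List (List Int)) (x y : Nat) : pvCell m ↑x ↑y = pvVal m x y := by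
  simp [pvCell, pvVal, PySem.List.pyGetD_natCast]

-- unfolding lemmas for reach
lemma reach_val_nine (m : List (List Int)) (X Y : Int) (h : pvCell m X Y = 9) :
    reach m X Y = ([(X, Y)], 1) := by
  rw [reach]; rw [if_pos h]

lemma reach_val_dead (m : List (List Int)) (X Y : Int) (h9 : pvCell m X Y ≠ 9)
    (h : ¬ (0 ≤ pvCell m X Y ∧ pvCell m X Y < 9)) : reach m X Y = ([], 0) := by
  rw [reach]; rw [if_neg h9, dif_neg h]

lemma reach_val_mid (m : List (List Int)) (X Y : Int) (h9 : pvCell m X Y ≠ 9)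
    (h : 0 ≤ pvCell m X Y ∧ pvCell m X Y < 9) :
    reach m X Y = pvDIRECTIONS.foldl (fun acc d =>
      if pvInBounds m (X + d.1) (Y + d.2) = true ∧ pvCell m (X + d.1) (Y + d.2) = pvCell m X Y + 1 then
        (PySem.Set.union acc.1 (reach m (X + d.1) (Y + d.2)).1, acc.2 + (reach m (X + d.1) (Y + d.2)).2)
      else acc) ([], 0) := by
  rw [reach]; rw [if_neg h9, dif_pos h]
  have e1 : ∀ z : Int, z + -1 = z - 1 := fun z => by ring
  have e2 : ∀ z : Int, z + 0 = z := fun z => by ring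
  simp only [pvDIRECTIONS, List.foldl_cons, List.foldl_nil, dite_eq_ite, e1, e2]

-- list set/get helpers
lemma pv_getD_eq_getElem {α : Type} (l : List α) (n : Nat) (d : α) (h : n < l.length) :
    l.getD n d = l[n] := by
  simp [List.getD_eq_getElem?_getD, List.getElem?_eq_getElem h]

lemma pv_getD_set_self {α : Type} (l : List α) (n : Nat) (v : α) (d : α) (h : n < l.length) :
    (l.set n v).getD n d = v := by
  rw [pv_getD_eq_getElem _ _ _ (by simpa using h)]
  simp [List.getElem_set_self]

lemma pv_getD_set_ne {α : Type} (l : List α) (n k : Nat) (v : α) (d : α) (h : n ≠ k) :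
    (l.set n v).getD k d = l.getD k d := by
  simp [List.getD_eq_getElem?_getD, List.getElem?_set_ne h]

lemma pvShape_set {α : Type} {m : List (List Int)} {g : List (List α)} (hs : pvShape m g)
    (x y : Nat) (v : α) :
    pvShape m (g.set x ((g.getD x []).set y v)) := by
  obtain ⟨hl, hr⟩ := hs
  refine ⟨by simpa using hl, fun x' => ?_⟩
  by_cases hx : x = x'
  · subst hx
    by_cases hxl : x < g.length
    · rw [pv_getD_set_self _ _ _ _ hxl]; simpa using hr x
    · rw [List.set_eq_of_length_le (by omega)]
      exact hr x
  · rw [pv_getD_set_ne _ _ _ _ _ hx]; exact hr x'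

lemma pvEntry_update {α : Type} {m : List (List Int)} {g : List (List α)} (hs : pvShape m g)
    (d : α) (x y : Nat) (hx : x < m.length) (hy : y < (m.getD x []).length) (v : α) (x' y' : Nat) :
    pvEntry (g.set x ((g.getD x []).set y v)) d x' y' =
      if x' = x ∧ y' = y then v else pvEntry g d x' y' := by
  obtain ⟨hl, hr⟩ := hs
  unfold pvEntry
  by_cases hxx : x' = x
  · subst hxx
    rw [pv_getD_set_self _ _ _ _ (by omega)]
    by_cases hyy : y' = y
    · subst hyy; rw [pv_getD_set_self _ _ _ _ (by rw [hr]; exact hy)]; simp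
    · rw [pv_getD_set_ne _ _ _ _ _ (fun hc => hyy hc.symm)]; simp [hyy]
  · rw [pv_getD_set_ne _ _ _ _ _ (fun hc => hxx hc.symm)]
    simp [hxx]

-- initial grid entries
lemma pv_getD_map_enum {α β : Type} (l : List α) (f : Int × α → β) (x : Nat) (d : β)
    (hx : x < l.length) :
    ((PySem.List.enumerate l 0).map f).getD x d = f (↑x, l[x]) := by
  rw [pv_getD_eq_getElem _ _ _ (by simpa [PySem.List.length_enumerate] using hx)]
  simp [PySem.List.getElem_enumerate]

-- reads during a sweep: a neighbour admitted by the guard is a real cell of height i+1,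
-- and any grid that already agrees with reach on height-(i+1) cells yields reach's value
lemma pv_read_eq {m : List (List Int)} (hPre : Pre_get_topography_score_and_ratings m)
    {x y : Nat} (hx : x < m.length) (hy : y < (m.getD x []).length)
    (hv0 : 0 ≤ pvVal m x y) (hv8 : pvVal m x y ≤ 8)
    {sc : List (List (List (Int × Int)))} {rt : List (List Int)}
    (hsc : ∀ x' y' : Nat, x' < m.length → y' < (m.getD x' []).length →
      pvVal m x' y' = pvVal m x y + 1 → pvEntry sc [] x' y' = (reach m ↑x' ↑y').1)
    (hrt : ∀ x' y' : Nat, x' < m.length → y' < (m.getD x' []).length →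
      pvVal m x' y' = pvVal m x y + 1 → pvEntry rt 0 x' y' = (reach m ↑x' ↑y').2)
    {d : Int × Int} (hd : d ∈ ([(-1, 0), (1, 0), (0, 1), (0, -1)] : List (Int × Int)))
    (hb : pvInBounds m (↑x + d.1) (↑y + d.2) = true)
    (hc : pvCell m (↑x + d.1) (↑y + d.2) = pvVal m x y + 1) :
    PySem.List.pyGetD (PySem.List.pyGetD sc (↑x + d.1) []) (↑y + d.2) [] = (reach m (↑x + d.1) (↑y + d.2)).1 ∧
    PySem.List.pyGetD (PySem.List.pyGetD rt (↑x + d.1) []) (↑y + d.2) 0 = (reach m (↑x + d.1) (↑y + d.2)).2 := by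
  have hb' : 0 ≤ (x : Int) + d.1 ∧ (x : Int) + d.1 < (m.length : Int) ∧
      0 ≤ (y : Int) + d.2 ∧ (y : Int) + d.2 < ((m.headD []).length : Int) := by
    simpa [pvInBounds] using hb
  obtain ⟨h1, h2, h3, h4⟩ := hb'
  have hrow : ((y : Int) + d.2).toNat < (m.getD ((x : Int) + d.1).toNat []).length :=
    hPre x (List.mem_range.mpr hx) y (List.mem_range.mpr hy) d hd ⟨hv0, hv8, h1, h2, h3, h4⟩
  have hxc : (((((x : Int) + d.1).toNat : Nat)) : Int) = (x : Int) + d.1 := Int.toNat_of_nonneg h1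
  have hyc : (((((y : Int) + d.2).toNat : Nat)) : Int) = (y : Int) + d.2 := Int.toNat_of_nonneg h3
  have hnx : ((x : Int) + d.1).toNat < m.length := by omega
  have hval : pvVal m ((x : Int) + d.1).toNat ((y : Int) + d.2).toNat = pvVal m x y + 1 := by
    rw [← pvCell_natCast, hxc, hyc]; exact hc
  constructor
  · have h5 := hsc _ _ hnx hrow hval
    rw [← hxc, ← hyc, PySem.List.pyGetD_natCast, PySem.List.pyGetD_natCast]
    exact h5
  · have h5 := hrt _ _ hnx hrow hval
    rw [← hxc, ← hyc, PySem.List.pyGetD_natCast, PySem.List.pyGetD_natCast]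
    exact h5

-- the value A writes into a swept cell is exactly reach at that cell
lemma pv_new_entry {m : List (List Int)} (hPre : Pre_get_topography_score_and_ratings m)
    {x y : Nat} (hx : x < m.length) (hy : y < (m.getD x []).length)
    (hv0 : 0 ≤ pvVal m x y) (hv8 : pvVal m x y ≤ 8)
    {sc : List (List (List (Int × Int)))} {rt : List (List Int)}
    (hsc : ∀ x' y' : Nat, x' < m.length → y' < (m.getD x' []).length →
      pvVal m x' y' = pvVal m x y + 1 → pvEntry sc [] x' y' = (reach m ↑x' ↑y').1)
    (hrt : ∀ x' y' : Nat, x' < m.length → y' < (m.getD x' []).length →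
      pvVal m x' y' = pvVal m x y + 1 → pvEntry rt 0 x' y' = (reach m ↑x' ↑y').2) :
    sum_accessible_trail m sc (pvVal m x y) ↑x ↑y = (reach m ↑x ↑y).1 ∧
    sum_accessible_ratings m rt (pvVal m x y) ↑x ↑y = (reach m ↑x ↑y).2 := by
  have h9 : pvCell m ↑x ↑y ≠ 9 := by rw [pvCell_natCast]; omega
  have hmid : 0 ≤ pvCell m ↑x ↑y ∧ pvCell m ↑x ↑y < 9 := by rw [pvCell_natCast]; omega
  have hpair :
      (sum_accessible_trail m sc (pvVal m x y) ↑x ↑y, sum_accessible_ratings m rt (pvVal m x y) ↑x ↑y)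
        = reach m ↑x ↑y := by
    rw [reach_val_mid m ↑x ↑y h9 hmid]
    rw [sum_accessible_trail, sum_accessible_ratings]
    rw [← PySem.List.foldl_prod_mk
      (f := fun (acc : List (Int × Int)) (d : Int × Int) =>
        if verify_coordinate m (↑x + d.1) (↑y + d.2) &&
           (PySem.List.pyGetD (PySem.List.pyGetD m (↑x + d.1) []) (↑y + d.2) 0 == pvVal m x y + 1) then
          PySem.Set.union acc (PySem.List.pyGetD (PySem.List.pyGetD sc (↑x + d.1) []) (↑y + d.2) [])
        else acc)
      (g := fun (acc : Int) (d : Int × Int) =>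
        if verify_coordinate m (↑x + d.1) (↑y + d.2) &&
           (PySem.List.pyGetD (PySem.List.pyGetD m (↑x + d.1) []) (↑y + d.2) 0 == pvVal m x y + 1) then
          acc + PySem.List.pyGetD (PySem.List.pyGetD rt (↑x + d.1) []) (↑y + d.2) 0
        else acc)]
    apply PySem.List.foldl_congr_mem
    intro acc d hd
    have hd' : d ∈ ([(-1, 0), (1, 0), (0, 1), (0, -1)] : List (Int × Int)) := by
      simpa [pvDIRECTIONS] using hd
    have hcondeq :
        (verify_coordinate m (↑x + d.1) (↑y + d.2) &&
          (PySem.List.pyGetD (PySem.List.pyGetD m (↑x + d.1) []) (↑y + d.2) 0 == pvVal m x y + 1)) = true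
        ↔ (pvInBounds m (↑x + d.1) (↑y + d.2) = true ∧
            pvCell m (↑x + d.1) (↑y + d.2) = pvCell m ↑x ↑y + 1) := by
      rw [pvCell_natCast]
      simp [verify_coordinate, pvInBounds, pvCell, Bool.and_eq_true]
    by_cases hcond : pvInBounds m (↑x + d.1) (↑y + d.2) = true ∧
        pvCell m (↑x + d.1) (↑y + d.2) = pvCell m ↑x ↑y + 1
    · have hA : (verify_coordinate m (↑x + d.1) (↑y + d.2) &&
          (PySem.List.pyGetD (PySem.List.pyGetD m (↑x + d.1) []) (↑y + d.2) 0 == pvVal m x y + 1)) = true :=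
        hcondeq.mpr hcond
      have hread := pv_read_eq hPre hx hy hv0 hv8 hsc hrt hd' hcond.1
        (by rw [← pvCell_natCast m x y]; exact hcond.2)
      rw [if_pos hA, if_pos hA, if_pos hcond, hread.1, hread.2]
    · have hA : ¬ ((verify_coordinate m (↑x + d.1) (↑y + d.2) &&
          (PySem.List.pyGetD (PySem.List.pyGetD m (↑x + d.1) []) (↑y + d.2) 0 == pvVal m x y + 1)) = true) :=
        fun hcc => hcond (hcondeq.mp hcc)
      rw [if_neg hA, if_neg hA, if_neg hcond]
  exact ⟨congrArg Prod.fst hpair, congrArg Prod.snd hpair⟩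

-- progress predicates: rows before r done; plus, in row x, the first c cells done
def pvDcol (x c : Nat) : Nat → Nat → Bool := fun x' y' =>
  decide (x' < x) || (decide (x' = x) && decide (y' < c))

def pvDrow (r : Nat) : Nat → Nat → Bool := fun x' _ => decide (x' < r)

-- the inner (column) loop of one sweep
lemma pv_cols {m : List (List Int)} (hPre : Pre_get_topography_score_and_ratings m)
    {i : Int} (hi0 : 0 ≤ i) (hi8 : i ≤ 8) {x : Nat} (hx : x < m.length) :
    ∀ (l : List Int) (c : Nat), l = (m.getD x []).drop c →
    ∀ st, pvDesc m (pvCond m i (pvDcol x c)) st →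
      pvDesc m (pvCond m i (pvDcol x (m.getD x []).length))
        ((PySem.List.enumerate l ↑c).foldl (pvCellStep m i ↑x) st) := by
  intro l
  induction l with
  | nil =>
    intro c hl st hst
    simp only [PySem.List.enumerate_nil, List.foldl_nil]
    have hlen : (m.getD x []).length ≤ c := by
      by_contra hcon
      have h2 := congrArg List.length hl
      rw [List.length_nil, List.length_drop] at h2
      omega
    refine pvDesc_congr (fun x' y' hx' hy' => ?_) hst
    by_cases hxx : x' = x
    · subst hxx
      have : (decide (y' < c)) = (decide (y' < (m.getD x' []).length)) := by
        simp only [decide_eq_decide]; omega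
      simp only [pvCond, pvDcol, this]
    · simp only [pvCond, pvDcol, hxx, decide_false, Bool.false_and, Bool.or_false]
  | cons a l' ih =>
    intro c hl st hst
    have hcl : c < (m.getD x []).length := by
      by_contra hcon
      rw [List.drop_eq_nil_of_le (by omega)] at hl
      exact List.cons_ne_nil a l' hl
    have hdrop : (m.getD x []).drop c = (m.getD x [])[c] :: (m.getD x []).drop (c + 1) :=
      List.drop_eq_getElem_cons hcl
    rw [hdrop] at hl
    have ha : a = (m.getD x [])[c] := (List.cons.injEq _ _ _ _ ▸ hl).1
    have hl' : l' = (m.getD x []).drop (c + 1) := (List.cons.injEq _ _ _ _ ▸ hl).2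
    have hval : pvVal m x c = a := by
      rw [pvVal, pv_getD_eq_getElem _ _ _ hcl, ha]
    rw [PySem.List.enumerate_cons, List.foldl_cons]
    have hcast : ((c : Int) + 1) = ((c + 1 : Nat) : Int) := by push_cast; ring
    obtain ⟨hs1, hs2, hent⟩ := hst
    by_cases hai : a = i
    · -- update step
      have hsc : ∀ x' y' : Nat, x' < m.length → y' < (m.getD x' []).length →
          pvVal m x' y' = pvVal m x c + 1 → pvEntry st.1 [] x' y' = (reach m ↑x' ↑y').1 := by
        intro x' y' hx' hy' hv
        rw [(hent x' y' hx' hy').1]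
        have hcd : pvCond m i (pvDcol x c) x' y' = true := by
          simp only [pvCond, Bool.or_eq_true, decide_eq_true_eq]
          right; rw [hv, hval, hai]; omega
        rw [hcd, if_pos rfl]
      have hrt : ∀ x' y' : Nat, x' < m.length → y' < (m.getD x' []).length →
          pvVal m x' y' = pvVal m x c + 1 → pvEntry st.2 0 x' y' = (reach m ↑x' ↑y').2 := by
        intro x' y' hx' hy' hv
        rw [(hent x' y' hx' hy').2]
        have hcd : pvCond m i (pvDcol x c) x' y' = true := by
          simp only [pvCond, Bool.or_eq_true, decide_eq_true_eq]
          right; rw [hv, hval, hai]; omega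
        rw [hcd, if_pos rfl]
      have hv0 : 0 ≤ pvVal m x c := by rw [hval, hai]; exact hi0
      have hv8 : pvVal m x c ≤ 8 := by rw [hval, hai]; exact hi8
      have hnew := pv_new_entry hPre hx hcl hv0 hv8 hsc hrt
      have hstep : pvCellStep m i ↑x st (↑c, a) =
          (st.1.set x ((st.1.getD x []).set c (sum_accessible_trail m st.1 i ↑x ↑c)),
           st.2.set x ((st.2.getD x []).set c (sum_accessible_ratings m st.2 i ↑x ↑c))) := by
        simp [pvCellStep, hai, PySem.List.pySetD_natCast, PySem.List.pyGetD_natCast]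
      rw [hstep, hcast]
      apply ih (c + 1) hl'
      refine ⟨pvShape_set hs1 _ _ _, pvShape_set hs2 _ _ _, fun x' y' hx' hy' => ?_⟩
      constructor
      · show pvEntry (st.1.set x ((st.1.getD x []).set c (sum_accessible_trail m st.1 i ↑x ↑c))) [] x' y' = _
        rw [pvEntry_update hs1 [] x c hx hcl]
        by_cases hhit : x' = x ∧ y' = c
        · rw [if_pos hhit]
          obtain ⟨e1, e2⟩ := hhit; subst e1; subst e2
          have hcnd : pvCond m i (pvDcol x' (y' + 1)) x' y' = true := by
            simp [pvCond, pvDcol, hval, hai]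
          rw [hcnd, if_pos rfl, show i = pvVal m x' y' from by rw [hval, hai]]
          exact hnew.1
        · rw [if_neg hhit]
          have hcnd : pvCond m i (pvDcol x (c + 1)) x' y' = pvCond m i (pvDcol x c) x' y' := by
            simp only [pvCond, pvDcol]
            by_cases hxx : x' = x
            · have hyy : ¬ (y' = c) := fun hcc => hhit ⟨hxx, hcc⟩
              have : (decide (y' < c + 1)) = (decide (y' < c)) := by
                simp only [decide_eq_decide]; omega
              rw [this]
            · simp [hxx]
          rw [hcnd]
          exact (hent x' y' hx' hy').1
      · show pvEntry (st.2.set x ((st.2.getD x []).set c (sum_accessible_ratings m st.2 i ↑x ↑c))) 0 x' y' = _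
        rw [pvEntry_update hs2 0 x c hx hcl]
        by_cases hhit : x' = x ∧ y' = c
        · rw [if_pos hhit]
          obtain ⟨e1, e2⟩ := hhit; subst e1; subst e2
          have hcnd : pvCond m i (pvDcol x' (y' + 1)) x' y' = true := by
            simp [pvCond, pvDcol, hval, hai]
          rw [hcnd, if_pos rfl, show i = pvVal m x' y' from by rw [hval, hai]]
          exact hnew.2
        · rw [if_neg hhit]
          have hcnd : pvCond m i (pvDcol x (c + 1)) x' y' = pvCond m i (pvDcol x c) x' y' := by
            simp only [pvCond, pvDcol]
            by_cases hxx : x' = x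
            · have hyy : ¬ (y' = c) := fun hcc => hhit ⟨hxx, hcc⟩
              have : (decide (y' < c + 1)) = (decide (y' < c)) := by
                simp only [decide_eq_decide]; omega
              rw [this]
            · simp [hxx]
          rw [hcnd]
          exact (hent x' y' hx' hy').2
    · -- skip step
      have hstep : pvCellStep m i ↑x st (↑c, a) = st := by
        simp [pvCellStep, hai]
      rw [hstep, hcast]
      apply ih (c + 1) hl'
      refine pvDesc_congr (fun x' y' hx' hy' => ?_) ⟨hs1, hs2, hent⟩
      simp only [pvCond, pvDcol]
      by_cases hxx : x' = x
      · subst hxx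
        by_cases hyy : y' = c
        · subst hyy
          have hne : (decide (pvVal m x' y' = i)) = false := by
            simp only [decide_eq_false_iff_not]
            rw [hval]; exact fun hcc => hai hcc
          rw [hne]
          simp
        · have : (decide (y' < c)) = (decide (y' < c + 1)) := by
            simp only [decide_eq_decide]; omega
          rw [this]
      · simp [hxx]

-- the outer (row) loop of one sweep
lemma pv_rows {m : List (List Int)} (hPre : Pre_get_topography_score_and_ratings m)
    {i : Int} (hi0 : 0 ≤ i) (hi8 : i ≤ 8) :
    ∀ (rs : List (List Int)) (s : Nat), rs = m.drop s →
    ∀ st, pvDesc m (pvCond m i (pvDrow s)) st →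
      pvDesc m (pvCond m i (pvDrow m.length))
        ((PySem.List.enumerate rs ↑s).foldl (pvRowStep m i) st) := by
  intro rs
  induction rs with
  | nil =>
    intro s hs st hst
    simp only [PySem.List.enumerate_nil, List.foldl_nil]
    have hlen : m.length ≤ s := by
      by_contra hcon
      have h2 := congrArg List.length hs
      rw [List.length_nil, List.length_drop] at h2
      omega
    refine pvDesc_congr (fun x' y' hx' hy' => ?_) hst
    simp only [pvCond, pvDrow]
    have : (decide (x' < s)) = (decide (x' < m.length)) := by
      simp only [decide_eq_decide]; omega
    rw [this]
  | cons row rest ih =>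
    intro s hs st hst
    have hsl : s < m.length := by
      by_contra hcon
      rw [List.drop_eq_nil_of_le (by omega)] at hs
      exact List.cons_ne_nil row rest hs
    have hdrop : m.drop s = m[s] :: m.drop (s + 1) := List.drop_eq_getElem_cons hsl
    rw [hdrop] at hs
    have hrow : row = m[s] := (List.cons.injEq _ _ _ _ ▸ hs).1
    have hrest : rest = m.drop (s + 1) := (List.cons.injEq _ _ _ _ ▸ hs).2
    rw [PySem.List.enumerate_cons, List.foldl_cons]
    have hcast : ((s : Int) + 1) = ((s + 1 : Nat) : Int) := by push_cast; ring
    have hrowstep : pvRowStep m i st (↑s, row) =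
        (PySem.List.enumerate ((m.getD s []).drop 0) (((0 : Nat)) : Int)).foldl (pvCellStep m i ↑s) st := by
      show (PySem.List.enumerate row 0).foldl (pvCellStep m i ↑s) st = _
      rw [hrow, ← pv_getD_eq_getElem m s [] hsl, List.drop_zero]
      norm_num
    rw [hrowstep, hcast]
    have hcols := pv_cols hPre hi0 hi8 hsl ((m.getD s []).drop 0) 0 rfl st
      (pvDesc_congr (fun x' y' hx' hy' => by
        simp only [pvCond, pvDcol, pvDrow]
        by_cases hxx : x' = s <;> simp [hxx]) hst)
    apply ih (s + 1) hrest
    refine pvDesc_congr (fun x' y' hx' hy' => ?_) hcols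
    simp only [pvCond, pvDcol, pvDrow]
    by_cases hxx : x' = s
    · subst hxx
      have hyl : (decide (y' < (m.getD x' []).length)) = true := by
        simpa using hy'
      have hx1 : (decide (x' < x')) = false := by simp
      have hx2 : (decide (x' = x')) = true := by simp
      have hx3 : (decide (x' < x' + 1)) = true := by simp
      rw [hyl, hx1, hx2, hx3]
      simp
    · have h2 : (decide (x' < s) : Bool) = decide (x' < s + 1) := by
        simp only [decide_eq_decide]; omega
      have h3 : (decide (x' = s)) = false := by simpa using hxx
      rw [h2, h3]
      simp

-- one full sweep at height i followed by renaming the target height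
lemma pv_round {m : List (List Int)} (hPre : Pre_get_topography_score_and_ratings m)
    {i : Int} (j : Int) (hi0 : 0 ≤ i) (hi8 : i ≤ 8) (hij : j = i - 1)
    {st : (List (List (List (Int × Int)))) × List (List Int)}
    (hst : pvDesc m (pvCond m i (fun _ _ => false)) st) :
    pvDesc m (pvCond m j (fun _ _ => false))
      ((PySem.List.enumerate m 0).foldl (pvRowStep m i) st) := by
  subst hij
  have h0 : pvDesc m (pvCond m i (pvDrow 0)) st := by
    refine pvDesc_congr (fun x' y' _ _ => ?_) hst
    simp [pvCond, pvDrow]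
  have hrows := pv_rows hPre hi0 hi8 m 0 (by simp) st
    (by simpa using h0)
  have hz : (((0 : Nat)) : Int) = (0 : Int) := by norm_num
  rw [hz] at hrows
  refine pvDesc_congr (fun x' y' hx' hy' => ?_) hrows
  simp only [pvCond, pvDrow, Bool.and_false, Bool.false_or]
  have hxl : (decide (x' < m.length)) = true := by simpa using hx'
  rw [hxl, Bool.and_true]
  by_cases h1 : pvVal m x' y' = i
  · have e1 : (decide (pvVal m x' y' = i)) = true := by simpa using h1
    have e2 : (decide (i - 1 < pvVal m x' y' ∧ pvVal m x' y' ≤ 9)) = true := by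
      simp only [decide_eq_true_eq]; omega
    rw [e1, e2]
    simp
  · have e1 : (decide (pvVal m x' y' = i)) = false := by simpa using h1
    have e2 : (decide (i - 1 < pvVal m x' y' ∧ pvVal m x' y' ≤ 9)) =
        (decide (i < pvVal m x' y' ∧ pvVal m x' y' ≤ 9)) := by
      simp only [decide_eq_decide]; omega
    rw [e1, e2]
    simp

-- the initial grids satisfy the invariant for i = 8
lemma pv_init (m : List (List Int)) :
    pvDesc m (pvCond m 8 (fun _ _ => false)) (pvInitS m, pvInitR m) := by
  have hshapeS : pvShape m (pvInitS m) := by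
    refine ⟨by simp [pvInitS, PySem.List.length_enumerate], fun x => ?_⟩
    by_cases hx : x < m.length
    · rw [pvInitS, pv_getD_map_enum _ _ _ _ hx]
      simp [PySem.List.length_enumerate, List.getD_eq_getElem?_getD, List.getElem?_eq_getElem hx]
    · rw [pvInitS, List.getD_eq_getElem?_getD, List.getElem?_eq_none
        (by simpa [PySem.List.length_enumerate] using Nat.le_of_not_lt hx)]
      rw [List.getD_eq_getElem?_getD, List.getElem?_eq_none (by simpa using Nat.le_of_not_lt hx)]
      rfl
  have hshapeR : pvShape m (pvInitR m) := by
    refine ⟨by simp [pvInitR, PySem.List.length_enumerate], fun x => ?_⟩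
    by_cases hx : x < m.length
    · rw [pvInitR, pv_getD_map_enum _ _ _ _ hx]
      simp [PySem.List.length_enumerate, List.getD_eq_getElem?_getD, List.getElem?_eq_getElem hx]
    · rw [pvInitR, List.getD_eq_getElem?_getD, List.getElem?_eq_none
        (by simpa [PySem.List.length_enumerate] using Nat.le_of_not_lt hx)]
      rw [List.getD_eq_getElem?_getD, List.getElem?_eq_none (by simpa using Nat.le_of_not_lt hx)]
  refine ⟨hshapeS, hshapeR, ?_⟩
  intro x y hx hy
  have hyx : y < m[x].length := by rwa [pv_getD_eq_getElem _ _ _ hx] at hy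
  have hentS : pvEntry (pvInitS m) [] x y =
      (if m[x][y] == 9 then PySem.Set.ofList [((x : Int), (y : Int))] else PySem.Set.empty) := by
    rw [pvEntry, pvInitS, pv_getD_map_enum _ _ _ _ hx,
      pv_getD_map_enum _ _ _ _ hyx]
  have hentR : pvEntry (pvInitR m) 0 x y = (if m[x][y] == 9 then (1 : Int) else 0) := by
    rw [pvEntry, pvInitR, pv_getD_map_enum _ _ _ _ hx,
      pv_getD_map_enum _ _ _ _ hyx]
  have hvv : pvVal m x y = m[x][y] := by
    rw [pvVal, pv_getD_eq_getElem _ _ _ hx, pv_getD_eq_getElem _ _ _ hyx]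
  have hcnd : pvCond m 8 (fun _ _ => false) x y = decide (pvVal m x y = 9) := by
    simp only [pvCond, Bool.and_false, Bool.false_or, decide_eq_decide]
    omega
  rw [hentS, hentR, hcnd]
  by_cases h9 : pvVal m x y = 9
  · have hb : (m[x][y] == 9) = true := by rw [← hvv]; simpa using h9
    have hr := reach_val_nine m ↑x ↑y (by rw [pvCell_natCast]; exact h9)
    have hd : (decide (pvVal m x y = 9)) = true := by simpa using h9
    rw [hb, hd, hr]
    simp [PySem.Set.ofList]
  · have hb : (m[x][y] == 9) = false := by rw [← hvv]; simpa using h9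
    have hd : (decide (pvVal m x y = 9)) = false := by simpa using h9
    rw [hb, hd]
    simp [PySem.Set.empty]

-- after the last sweep every entry is reach's value
lemma pv_final_entry {m : List (List Int)}
    {st : (List (List (List (Int × Int)))) × List (List Int)}
    (hst : pvDesc m (pvCond m (-1) (fun _ _ => false)) st) :
    pvShape m st.1 ∧ pvShape m st.2 ∧
    ∀ x y : Nat, x < m.length → y < (m.getD x []).length →
      pvEntry st.1 [] x y = (reach m ↑x ↑y).1 ∧ pvEntry st.2 0 x y = (reach m ↑x ↑y).2 := by
  obtain ⟨h1, h2, h3⟩ := hst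
  refine ⟨h1, h2, fun x y hx hy => ?_⟩
  obtain ⟨e1, e2⟩ := h3 x y hx hy
  by_cases hin : -1 < pvVal m x y ∧ pvVal m x y ≤ 9
  · have : pvCond m (-1) (fun _ _ => false) x y = true := by
      simp [pvCond, hin]
    rw [this] at e1 e2
    simpa using And.intro e1 e2
  · have hcnd : pvCond m (-1) (fun _ _ => false) x y = false := by
      simp only [pvCond, Bool.and_false, Bool.false_or, decide_eq_false_iff_not]
      exact hin
    rw [hcnd] at e1 e2
    have h9 : pvCell m ↑x ↑y ≠ 9 := by rw [pvCell_natCast]; omega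
    have hdead : ¬ (0 ≤ pvCell m ↑x ↑y ∧ pvCell m ↑x ↑y < 9) := by
      rw [pvCell_natCast]; omega
    rw [reach_val_dead m ↑x ↑y h9 hdead]
    simpa using And.intro e1 e2

-- the final state prints exactly B's output
lemma pv_output_eq {m : List (List Int)} (st : (List (List (List (Int × Int)))) × List (List Int))
    (hs1 : pvShape m st.1) (hs2 : pvShape m st.2)
    (hent : ∀ x y : Nat, x < m.length → y < (m.getD x []).length →
      pvEntry st.1 [] x y = (reach m ↑x ↑y).1 ∧ pvEntry st.2 0 x y = (reach m ↑x ↑y).2) :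
    st = get_topography_score_and_ratings_alt m := by
  rw [get_topography_score_and_ratings_alt]
  apply Prod.ext
  · apply List.ext_getElem
    · simp [hs1.1, PySem.List.length_enumerate]
    · intro x hx1 hx2
      have hxm : x < m.length := by rwa [hs1.1] at hx1
      have hrl : (st.1[x]).length = (m.getD x []).length := by
        have h := hs1.2 x
        rwa [pv_getD_eq_getElem _ _ _ hx1] at h
      apply List.ext_getElem
      · simp only [List.getElem_map, PySem.List.getElem_enumerate, List.length_map,
          PySem.List.length_pyRange_one]
        rw [hrl, pv_getD_eq_getElem _ _ _ hxm]
        omega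
      · intro y hy1 hy2
        have hym : y < (m.getD x []).length := by omega
        have hcell := (hent x y hxm hym).1
        rw [pvEntry, pv_getD_eq_getElem _ _ _ hx1,
          pv_getD_eq_getElem _ _ _ (by omega : y < (st.1[x]).length)] at hcell
        rw [hcell]
        simp only [List.getElem_map, PySem.List.getElem_enumerate, PySem.List.getElem_pyRange_one]
        norm_num
  · apply List.ext_getElem
    · simp [hs2.1, PySem.List.length_enumerate]
    · intro x hx1 hx2
      have hxm : x < m.length := by rwa [hs2.1] at hx1
      have hrl : (st.2[x]).length = (m.getD x []).length := by
        have h := hs2.2 x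
        rwa [pv_getD_eq_getElem _ _ _ hx1] at h
      apply List.ext_getElem
      · simp only [List.getElem_map, PySem.List.getElem_enumerate, List.length_map,
          PySem.List.length_pyRange_one]
        rw [hrl, pv_getD_eq_getElem _ _ _ hxm]
        omega
      · intro y hy1 hy2
        have hym : y < (m.getD x []).length := by omega
        have hcell := (hent x y hxm hym).2
        rw [pvEntry, pv_getD_eq_getElem _ _ _ hx1,
          pv_getD_eq_getElem _ _ _ (by omega : y < (st.2[x]).length)] at hcell
        rw [hcell]
        simp only [List.getElem_map, PySem.List.getElem_enumerate, PySem.List.getElem_pyRange_one]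
        norm_num

-- ===== VERDICT (by name: the statement is the Claim_ definition above) =====
theorem get_topography_score_and_ratings_spec : Claim_equal_get_topography_score_and_ratings := by
  intro m _ hPre
  unfold Spec_get_topography_score_and_ratings
  have hA : get_topography_score_and_ratings m =
      ([8, 7, 6, 5, 4, 3, 2, 1, 0] : List Int).foldl
        (fun st i => (PySem.List.enumerate m 0).foldl (pvRowStep m i) st)
        (pvInitS m, pvInitR m) := by
    rw [get_topography_score_and_ratings,
      show PySem.List.pyRange 8 (-1) (-1) = ([8, 7, 6, 5, 4, 3, 2, 1, 0] : List Int) from by decide]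
    rfl
  have hd8 := pv_init m
  have hd7 := pv_round hPre 7 (by norm_num) (by norm_num) (by norm_num) hd8
  have hd6 := pv_round hPre 6 (by norm_num) (by norm_num) (by norm_num) hd7
  have hd5 := pv_round hPre 5 (by norm_num) (by norm_num) (by norm_num) hd6
  have hd4 := pv_round hPre 4 (by norm_num) (by norm_num) (by norm_num) hd5
  have hd3 := pv_round hPre 3 (by norm_num) (by norm_num) (by norm_num) hd4
  have hd2 := pv_round hPre 2 (by norm_num) (by norm_num) (by norm_num) hd3
  have hd1 := pv_round hPre 1 (by norm_num) (by norm_num) (by norm_num) hd2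
  have hd0 := pv_round hPre 0 (by norm_num) (by norm_num) (by norm_num) hd1
  have hdm1 := pv_round hPre (-1) (by norm_num) (by norm_num) (by norm_num) hd0
  obtain ⟨hs1, hs2, hent⟩ := pv_final_entry hdm1
  rw [hA]
  simp only [List.foldl_cons, List.foldl_nil]
  exact pv_output_eq _ hs1 hs2 hent
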